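-- pv_equiv track=rewrite | github.com/lmgibson/getDataDeps | src/getDataDeps.py | cleanFilePaths
-- ===== SOURCE A (Python) =====
-- def cleanFilePaths(file, listOfResults, type=None):
--     """
--     Constructs the data which consists of a dictionary within a dictionary.
--     The first level has keys that are the data file name, and the second
--     level contains two keys: saved and read. Within 'saved' and 'read'
--     are a list that contains the scripts that either save or read
--     the data file.
--
--     Args:
--         file (str): Path to a script that is being scanned
--         listOfResults (list): List of strings of data files used in file
--         type (string, optional): String to indicate if the list supplied
--         contains saved datafiles or read data files. Defaults to None.
--
--     Returns:
--         dict : Dictionary of format described above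
--     """
--     if type not in ['save', 'read']:
--         raise ValueError(
--             "Please specify whether or not listOfResults is"
--             "'save' or 'read' list.")
--
--     if not isinstance(listOfResults, list):
--         raise ValueError(
--             "Please provide a list to 'listOfResults'"
--         )
--
--     results = {}
--
--     for dataFile in listOfResults:
--         dataFile = dataFile.rsplit('/', 1)[-1]
--         if dataFile not in results:
--             results[dataFile] = {'save': [], 'read': []}
--             results[dataFile][type].append(file.rsplit('/', 1)[-1])
--         else:
--             results[dataFile][type].append(file.rsplit('/', 1)[-1])
--
--     return results
-- ===== SOURCE B (Python) =====
-- def cleanFilePaths(file, listOfResults, type=None):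
--     if type not in ['save', 'read']:
--         raise ValueError(
--             "Please specify whether or not listOfResults is"
--             "'save' or 'read' list.")
--
--     if not isinstance(listOfResults, list):
--         raise ValueError(
--             "Please provide a list to 'listOfResults'"
--         )
--
--     scriptName = file.rsplit('/', 1)[-1]
--
--     counts = {}
--     for dataFile in listOfResults:
--         name = dataFile.rsplit('/', 1)[-1]
--         counts[name] = counts.get(name, 0) + 1
--
--     return {name: {'save': [scriptName] * c if type == 'save' else [],
--                    'read': [scriptName] * c if type == 'read' else []}
--             for name, c in counts.items()}
-- ===== Notes on version B (the rewrite author's own statement) =====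
-- stated objective: alternative
-- what changed: Instead of A's incremental nested-dict mutation (per-element membership test plus append into an inner dict), B counts basenames in one flat pass and then builds each {'save','read'} entry in a second pass as [scriptName]*count via a dict comprehension.
import Mathlib
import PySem

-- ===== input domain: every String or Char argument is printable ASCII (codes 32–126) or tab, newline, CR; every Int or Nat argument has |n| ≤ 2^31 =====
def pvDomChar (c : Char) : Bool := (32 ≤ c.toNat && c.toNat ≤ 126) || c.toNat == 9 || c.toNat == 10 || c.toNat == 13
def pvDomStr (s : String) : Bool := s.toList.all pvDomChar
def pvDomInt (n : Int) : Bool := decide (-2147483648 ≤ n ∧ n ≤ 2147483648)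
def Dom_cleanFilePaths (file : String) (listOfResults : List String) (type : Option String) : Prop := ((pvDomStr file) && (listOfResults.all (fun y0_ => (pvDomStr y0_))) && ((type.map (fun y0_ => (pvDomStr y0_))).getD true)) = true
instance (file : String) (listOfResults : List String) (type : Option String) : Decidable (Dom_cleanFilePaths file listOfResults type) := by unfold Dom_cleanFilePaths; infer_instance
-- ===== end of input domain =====

-- B replaces A's per-element nested-dict mutation by a flat basename count pass followed by a
-- build pass producing each type list as `[scriptName] * count` (objective: alternative, same cost).

-- s.rsplit('/', 1)[-1], ported by hand (exact: the suffix after the last '/', the whole string if none)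
def pvBasename (s : String) : String :=
  String.ofList ((s.toList.reverse.takeWhile (fun c => c != '/')).reverse)

-- ===== PORT A =====
-- {'save': [], 'read': []}
def pvInner0 : PySem.Dict String (List String) :=
  PySem.Dict.ofList [("save", []), ("read", [])]

-- A's loop body: `results[dataFile][type].append(...)` is ported as read–update–insert
-- (exact: Dict.insert overwrites in place); `type` is `t`, `script` = file.rsplit('/',1)[-1]
def pvStepA (t script : String) (d : PySem.Dict String (PySem.Dict String (List String)))
    (dataFile : String) : PySem.Dict String (PySem.Dict String (List String)) :=
  let name := pvBasename dataFile
  if d.contains name then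
    d.insert name ((d.getD name pvInner0).insert t ((d.getD name pvInner0).getD t [] ++ [script]))
  else
    let d1 := d.insert name pvInner0
    d1.insert name ((d1.getD name pvInner0).insert t ((d1.getD name pvInner0).getD t [] ++ [script]))

-- the two ValueError checks raise outside Pre_cleanFilePaths (isinstance is always true here)
def cleanFilePaths (file : String) (listOfResults : List String) (type : Option String) :
    List (String × List (String × List String)) :=
  let t := type.getD ""
  let script := pvBasename file
  let results := listOfResults.foldl (pvStepA t script) PySem.Dict.empty
  results.items.map (fun p => (p.1, p.2.items))

-- ===== PORT B =====
def cleanFilePaths_alt (file : String) (listOfResults : List String) (type : Option String) :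
    List (String × List (String × List String)) :=
  let t := type.getD ""
  let script := pvBasename file
  let counts := listOfResults.foldl
    (fun (d : PySem.Dict String Int) dataFile =>
      let name := pvBasename dataFile
      d.insert name (d.getD name 0 + 1)) PySem.Dict.empty
  counts.items.map (fun p =>
    (p.1, [("save", if t == "save" then List.replicate p.2.toNat script else []),
           ("read", if t == "read" then List.replicate p.2.toNat script else [])]))

-- ===== PRECONDITION & SPEC =====
-- Pre_ excludes exactly the inputs on which A raises ValueError (type not 'save'/'read')
def Pre_cleanFilePaths (file : String) (listOfResults : List String) (type : Option String) : Prop :=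
  type = some "save" ∨ type = some "read"
instance (file : String) (listOfResults : List String) (type : Option String) : Decidable (Pre_cleanFilePaths file listOfResults type) := by unfold Pre_cleanFilePaths; infer_instance

def pvWitness_cleanFilePaths : String × List String × Option String :=
  ("src/make.py", ["data/a.csv", "a.csv", "b.csv"], some "save")

def Spec_cleanFilePaths (file : String) (listOfResults : List String) (type : Option String) (out : List (String × List (String × List String))) : Prop := out = cleanFilePaths_alt file listOfResults type
instance (file : String) (listOfResults : List String) (type : Option String) (out : List (String × List (String × List String))) : Decidable (Spec_cleanFilePaths file listOfResults type out) := by unfold Spec_cleanFilePaths; infer_instance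

-- ===== CLAIM (what is proved, stated in full; the proofs are below) =====
def Claim_equal_cleanFilePaths : Prop := ∀ (file : String) (listOfResults : List String) (type : Option String), Dom_cleanFilePaths file listOfResults type → Pre_cleanFilePaths file listOfResults type → Spec_cleanFilePaths file listOfResults type (cleanFilePaths file listOfResults type)

-- ===== LEMMAS AND PROOFS =====

-- A's inner dict for a data file whose basename occurred c times
def pvInnerA (t script : String) (c : Nat) : PySem.Dict String (List String) :=
  pvInner0.insert t (List.replicate c script)

lemma pvInnerA_step (t script : String) (c : Nat) :
    (pvInnerA t script c).insert t ((pvInnerA t script c).getD t [] ++ [script])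
      = pvInnerA t script (c + 1) := by
  unfold pvInnerA
  rw [PySem.Dict.getD_insert_self, PySem.Dict.insert_insert_self, ← List.replicate_succ']

lemma pvInner0_getD (t : String) (ht : t = "save" ∨ t = "read") :
    pvInner0.getD t [] = [] := by
  rcases ht with h | h <;> subst h <;> rfl

lemma A_fold_items (t script : String) (ht : t = "save" ∨ t = "read") (xs : List String) :
    (xs.foldl (pvStepA t script) PySem.Dict.empty).items
      = (PySem.Set.ofList (xs.map pvBasename)).map
          (fun k => (k, pvInnerA t script ((xs.map pvBasename).count k))) := by
  induction xs using List.reverseRecOn with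
  | nil => rfl
  | append_singleton xs x ih =>
    rw [List.foldl_append, List.foldl_cons, List.foldl_nil]
    set l := xs.map pvBasename with hl
    set d := xs.foldl (pvStepA t script) PySem.Dict.empty with hd
    have hnodS : (PySem.Set.ofList l).Nodup := PySem.Set.nodup_ofList l
    have hkeys : d.keys = PySem.Set.ofList l := by
      show d.items.map (·.1) = _
      rw [ih, List.map_map]
      exact List.map_id' _
    have hnod : d.keys.Nodup := by rw [hkeys]; exact hnodS
    have hmapsingle : (xs ++ [x]).map pvBasename = l ++ [pvBasename x] := by
      simp [hl]
    set bx := pvBasename x with hbx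
    rw [hmapsingle, PySem.Set.ofList_append_singleton]
    by_cases hmem : bx ∈ l
    · -- bx already seen: A's then-branch
      have hmemS : bx ∈ PySem.Set.ofList l := (PySem.Set.mem_ofList _ _).2 hmem
      have hcont : d.contains bx = true := by
        rw [PySem.Dict.contains_iff_mem_keys, hkeys]; exact hmemS
      have hget : d.getD bx pvInner0 = pvInnerA t script (l.count bx) := by
        refine PySem.Dict.getD_of_mem_items d ?_ hnod pvInner0
        rw [ih]
        exact List.mem_map.2 ⟨bx, hmemS, rfl⟩
      have hstep : pvStepA t script d x
          = d.insert bx (pvInnerA t script (l.count bx + 1)) := by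
        unfold pvStepA
        rw [← hbx, if_pos hcont, hget, pvInnerA_step]
      rw [hstep, PySem.Set.add_of_mem hmemS,
        PySem.Dict.items_insert_of_contains d _ hcont, ih, List.map_map]
      apply List.map_congr_left
      intro k hk
      by_cases hkx : k = bx
      · subst hkx
        simp [List.count_append]
      · have h1 : (k == bx) = false := by simp [hkx]
        have hkx' : ¬ bx = k := fun h => hkx h.symm
        simp [Function.comp, h1, hkx', List.count_append]
    · -- bx fresh: A's else-branch
      have hcont : d.contains bx = false := by
        rw [← Bool.not_eq_true, PySem.Dict.contains_iff_mem_keys, hkeys, PySem.Set.mem_ofList _ _]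
        exact hmem
      have hstep : pvStepA t script d x
          = d.insert bx (pvInnerA t script 1) := by
        unfold pvStepA
        rw [← hbx, if_neg (by simp [hcont])]
        show (d.insert bx pvInner0).insert bx
            (((d.insert bx pvInner0).getD bx pvInner0).insert t
              (((d.insert bx pvInner0).getD bx pvInner0).getD t [] ++ [script]))
          = d.insert bx (pvInnerA t script 1)
        rw [PySem.Dict.getD_insert_self, PySem.Dict.insert_insert_self, pvInner0_getD t ht,
          List.nil_append]
        rfl
      have hcount0 : l.count bx = 0 := List.count_eq_zero.2 hmem
      rw [hstep, PySem.Set.add_of_not_mem (by rw [PySem.Set.mem_ofList _ _]; exact hmem),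
        PySem.Dict.items_insert_of_not_contains d _ hcont, ih, List.map_append]
      congr 1
      · apply List.map_congr_left
        intro k hk
        have hkl : k ∈ l := (PySem.Set.mem_ofList _ _).1 hk
        have hbk : ¬ bx = k := fun h => hmem (h ▸ hkl)
        simp [List.count_append, hbk]
      · simp [List.count_append, hcount0]

lemma pvInnerA_items (t script : String) (ht : t = "save" ∨ t = "read") (c : Nat) :
    (pvInnerA t script c).items
      = [("save", if t == "save" then List.replicate c script else []),
         ("read", if t == "read" then List.replicate c script else [])] := by
  rcases ht with h | h <;> subst h <;> rfl

-- ===== VERDICT (by name: the statement is the Claim_ definition above) =====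
theorem cleanFilePaths_spec : Claim_equal_cleanFilePaths := by
  intro file listOfResults type _ hpre
  unfold Spec_cleanFilePaths cleanFilePaths cleanFilePaths_alt
  have ht : type.getD "" = "save" ∨ type.getD "" = "read" := by
    rcases hpre with h | h <;> subst h <;> simp
  set t := type.getD ""
  set script := pvBasename file
  -- B's counting loop is Counter over the basenames
  have hB : listOfResults.foldl
      (fun (d : PySem.Dict String Int) dataFile =>
        d.insert (pvBasename dataFile) (d.getD (pvBasename dataFile) 0 + 1)) PySem.Dict.empty
      = PySem.Dict.counter (listOfResults.map pvBasename) := by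
    rw [← PySem.Dict.foldl_insert_getD_add_one_eq_counter, List.foldl_map]
  simp only []
  rw [hB, PySem.Dict.items_counter, A_fold_items t script ht, List.map_map, List.map_map]
  apply List.map_congr_left
  intro k _
  simp only [Function.comp_apply, Int.toNat_natCast]
  rw [pvInnerA_items t script ht]
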